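-- pv_equiv track=rewrite | github.com/usama-hameed/leetcode | turing.py | solution
-- ===== SOURCE A (Python) =====
-- def solution(k: [int]) -> int:
--
--     # Count the frequency of each integer in the array
--     freq = {}
--     for num in k:
--         freq[num] = freq.get(num, 0) + 1
--     weight = max(freq.values())
--
--     # Initialize variables
--     left = 0
--     freq_window = {}
--     min_len = len(k) + 1
--
--     # Iterate over the array
--     for right in range(len(k)):
--         # Increment frequency of current integer in the window
--         freq_window[k[right]] = freq_window.get(k[right], 0) + 1
--
--         # Shrink the window if the frequency of the current integer exceeds the weight
--         while freq_window[k[right]] > weight: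
--             freq_window[k[left]] -= 1
--             left += 1
--
--         # Update smallest subarray length found so far if the frequency of the current integer is equal to the weight
--         if freq_window[k[right]] == weight:
--             min_len = min(min_len, right - left + 1)
--
--     return min_len
-- ===== SOURCE B (Python) =====
-- def solution(k: [int]) -> int:
--     # One pass: frequency of each value and the last index where it occurs.
--     freq = {}
--     last = {}
--     for i, v in enumerate(k):
--         freq[v] = freq.get(v, 0) + 1
--         last[v] = i
--     weight = max(freq.values())
--     # A's left pointer never moves, so its answer is last-occurrence index + 1
--     # of some max-frequency value, minimised over those values.
--     return min(last[v] + 1 for v in freq if freq[v] == weight)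
-- ===== Notes on version B (the rewrite author's own statement) =====
-- stated objective: simpler
-- what changed: Replaced the sliding-window scan (window counter dict, left pointer, while-shrink loop) by a single enumerate pass building frequency and last-index tables, returning min(last[v]+1) over the max-frequency values; Pre_ excludes only the empty list, on which A's max(freq.values()) raises ValueError.
-- outside the precondition, e.g. on solution([]): A raises ValueError, B raises ValueError
import Mathlib
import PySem

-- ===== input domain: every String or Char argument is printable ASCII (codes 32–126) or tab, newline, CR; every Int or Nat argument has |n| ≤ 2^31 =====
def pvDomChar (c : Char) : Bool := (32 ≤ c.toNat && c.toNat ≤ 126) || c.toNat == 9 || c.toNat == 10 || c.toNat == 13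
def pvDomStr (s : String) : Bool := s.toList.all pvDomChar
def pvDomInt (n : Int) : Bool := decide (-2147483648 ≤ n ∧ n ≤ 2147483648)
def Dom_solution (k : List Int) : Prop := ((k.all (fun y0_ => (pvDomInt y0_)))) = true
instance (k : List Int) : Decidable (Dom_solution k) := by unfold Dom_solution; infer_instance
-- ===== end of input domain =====

-- B replaces A's sliding-window scan by one enumerate pass building frequency and
-- last-index tables, returning min(last[v]+1) over the max-frequency values (simpler).
-- Pre_solution excludes only the empty list, on which both Pythons raise ValueError.


-- ===== PORT A =====
-- the 'while freq_window[k[right]] > weight:' loop; fuel bounds the iterations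
-- (len(k)+1 suffices since left ≤ right+1 throughout)
def solutionWhileLoop (k : List Int) (weight right : Int) :
    Nat → Int × PySem.Dict Int Int → Int × PySem.Dict Int Int
  | 0, st => st
  | fuel + 1, st =>
    if st.2.getD (PySem.List.pyGetD k right 0) 0 > weight then
      let kl := PySem.List.pyGetD k st.1 0
      solutionWhileLoop k weight right fuel (st.1 + 1, st.2.insert kl (st.2.getD kl 0 - 1))
    else st

-- one iteration of A's 'for right in range(len(k))' loop
def solutionBody (k : List Int) (weight : Int) (st : Int × PySem.Dict Int Int × Int)
    (right : Int) : Int × PySem.Dict Int Int × Int :=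
  let kr := PySem.List.pyGetD k right 0
  let fw := st.2.1.insert kr (st.2.1.getD kr 0 + 1)
  let lw := solutionWhileLoop k weight right (k.length + 1) (st.1, fw)
  let minLen := if lw.2.getD kr 0 == weight then min st.2.2 (right - lw.1 + 1) else st.2.2
  (lw.1, lw.2, minLen)

def solution (k : List Int) : Int :=
  let freq := k.foldl (fun d num => d.insert num (d.getD num 0 + 1)) PySem.Dict.empty
  match PySem.List.max? freq.values id with
  | none => 0   -- Python raises ValueError (max of empty) here; excluded by Pre_solution
  | some weight =>
    let st := (PySem.List.pyRange 0 k.length).foldl (solutionBody k weight)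
      ((0 : Int), (PySem.Dict.empty : PySem.Dict Int Int), ((k.length : Int) + 1))
    st.2.2

-- ===== PORT B =====
def solution_alt (k : List Int) : Int :=
  let fl := (PySem.List.enumerate k).foldl
      (fun (st : PySem.Dict Int Int × PySem.Dict Int Int) p =>
        (st.1.insert p.2 (st.1.getD p.2 0 + 1), st.2.insert p.2 p.1))
      (PySem.Dict.empty, PySem.Dict.empty)
  match PySem.List.max? fl.1.values id with
  | none => 0   -- Python raises ValueError (max of empty) here; excluded by Pre_solution
  | some weight =>
    let cands := (fl.1.keys.filter (fun v => fl.1.getD v 0 == weight)).map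
        (fun v => fl.2.getD v 0 + 1)
    (PySem.List.min? cands id).getD 0   -- cands is nonempty: the min never falls back

-- ===== PRECONDITION & SPEC =====
-- Pre_ excludes only the empty list: there A (and B) raise ValueError on max([]).
def Pre_solution (k : List Int) : Prop := k ≠ []
instance (k : List Int) : Decidable (Pre_solution k) := by unfold Pre_solution; infer_instance
def pvWitness_solution : List Int := [1, 2, 2, 3, 2, 1]

def Spec_solution (k : List Int) (out : Int) : Prop := out = solution_alt k
instance (k : List Int) (out : Int) : Decidable (Spec_solution k out) := by unfold Spec_solution; infer_instance

-- ===== CLAIM (what is proved, stated in full; the proofs are below) =====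
def Claim_equal_solution : Prop := ∀ (k : List Int), Dom_solution k → Pre_solution k → Spec_solution k (solution k)

-- ===== LEMMAS AND PROOFS =====

-- last index of v in l (meaningful when v ∈ l)
def lIdx : List Int → Int → Nat
  | [], _ => 0
  | _ :: xs, v => if v ∈ xs then lIdx xs v + 1 else 0

theorem lIdx_lt {l : List Int} {v : Int} (h : v ∈ l) : lIdx l v < l.length := by
  induction l with
  | nil => cases h
  | cons x xs ih =>
    simp only [lIdx, List.length_cons]
    by_cases hm : v ∈ xs
    · simp [hm, Nat.succ_lt_succ (ih hm)]
    · simp [hm]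

theorem lIdx_getD {l : List Int} {v : Int} (h : v ∈ l) : l.getD (lIdx l v) 0 = v := by
  induction l with
  | nil => cases h
  | cons x xs ih =>
    simp only [lIdx]
    by_cases hm : v ∈ xs
    · simpa [hm] using ih hm
    · have hx : v = x := by rcases List.mem_cons.1 h with h' | h' <;> simp_all
      subst hx
      simp [hm]

theorem lIdx_last {l : List Int} {v : Int} (h : v ∈ l) : v ∉ l.drop (lIdx l v + 1) := by
  induction l with
  | nil => cases h
  | cons x xs ih =>
    simp only [lIdx]
    by_cases hm : v ∈ xs
    · simpa [hm] using ih hm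
    · simp [hm]

theorem getD_mem_drop {l : List Int} {m j : Nat} (h1 : m ≤ j) (h2 : j < l.length) :
    l.getD j 0 ∈ l.drop m := by
  have h3 : (l.drop m)[j - m]? = l[j]? := by
    rw [List.getElem?_drop]; congr 1; omega
  have hj : l[j]? = some (l.getD j 0) := by
    rw [List.getD_eq_getElem l 0 h2]
    exact List.getElem?_eq_getElem h2
  exact List.mem_of_getElem? (h3.trans hj)

theorem lIdx_unique {l : List Int} {v : Int} {i : Nat} (hi : i < l.length)
    (hv : l.getD i 0 = v) (hlast : v ∉ l.drop (i + 1)) : i = lIdx l v := by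
  have hmem : v ∈ l := by
    rw [← hv, List.getD_eq_getElem l 0 hi]; exact List.getElem_mem hi
  rcases Nat.lt_trichotomy i (lIdx l v) with h | h | h
  · exfalso
    apply hlast
    have := lIdx_getD hmem
    rw [← this]
    exact getD_mem_drop h (lIdx_lt hmem)
  · exact h
  · exfalso
    apply lIdx_last hmem
    have h4 : l.getD i 0 ∈ l.drop (lIdx l v + 1) := getD_mem_drop h hi
    rwa [hv] at h4

-- count in a prefix vs no later occurrence
theorem count_take_eq_iff {l : List Int} {v : Int} {i : Nat} :
    (l.take (i + 1)).count v = l.count v ↔ v ∉ l.drop (i + 1) := by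
  have hc : l.count v = (l.take (i + 1)).count v + (l.drop (i + 1)).count v := by
    conv_lhs => rw [← List.take_append_drop (i + 1) l]
    exact List.count_append ..
  rw [← List.count_eq_zero]
  omega

-- generic: a fold with 'if p then min' equals a min-fold over the filtered mapped list
theorem foldl_if_min {α : Type} (p : α → Bool) (f : α → Int) :
    ∀ (l : List α) (m : Int),
      l.foldl (fun m i => if p i then min m (f i) else m) m
        = ((l.filter p).map f).foldl min m := by
  intro l
  induction l with
  | nil => intro m; rfl
  | cons x xs ih =>
    intro m
    by_cases hp : p x = true
    · simp [hp, ih]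
    · simp only [Bool.not_eq_true] at hp
      simp [hp, ih]

theorem foldl_min_le_init : ∀ (l : List Int) (m : Int), l.foldl min m ≤ m := by
  intro l
  induction l with
  | nil => intro m; simp
  | cons y ys ih =>
    intro m
    calc (y :: ys).foldl min m = ys.foldl min (min m y) := rfl
      _ ≤ min m y := ih _
      _ ≤ m := min_le_left _ _

theorem foldl_min_le_mem {l : List Int} {x : Int} (h : x ∈ l) (m : Int) :
    l.foldl min m ≤ x := by
  induction l generalizing m with
  | nil => cases h
  | cons y ys ih =>
    rcases List.mem_cons.1 h with h' | h'
    · subst h'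
      calc (x :: ys).foldl min m = ys.foldl min (min m x) := rfl
        _ ≤ min m x := foldl_min_le_init ys (min m x)
        _ ≤ x := min_le_right _ _
    · exact ih h' _


theorem foldl_min_mem_or : ∀ (l : List Int) (m : Int), l.foldl min m = m ∨ l.foldl min m ∈ l := by
  intro l
  induction l with
  | nil => intro m; left; rfl
  | cons y ys ih =>
    intro m
    rcases ih (min m y) with h | h
    · rcases min_cases m y with ⟨he, _⟩ | ⟨he, _⟩
      · left; rw [List.foldl_cons, h, he]
      · right; rw [List.foldl_cons, h, he]; simp
    · right; exact List.mem_cons_of_mem _ h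

-- ---------- A side ----------
theorem while_noop (k : List Int) (w r : Int) (fuel : Nat) (st : Int × PySem.Dict Int Int)
    (h : ¬ st.2.getD (PySem.List.pyGetD k r 0) 0 > w) :
    solutionWhileLoop k w r fuel st = st := by
  cases fuel <;> simp [solutionWhileLoop, h]

theorem counter_take_step (k : List Int) (a : Nat) (ha : a < k.length) :
    (PySem.Dict.counter (k.take a)).insert (k.getD a 0)
      ((PySem.Dict.counter (k.take a)).getD (k.getD a 0) 0 + 1)
    = PySem.Dict.counter (k.take (a + 1)) := by
  conv_rhs => rw [List.take_add_one]
  rw [← PySem.Dict.foldl_insert_getD_add_one_eq_counter (k.take a ++ k[a]?.toList),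
      List.foldl_append, PySem.Dict.foldl_insert_getD_add_one_eq_counter]
  rw [List.getElem?_eq_getElem ha]
  rw [List.getD_eq_getElem k 0 ha]
  rfl

-- the value A's 'if' adds at index i, as a function of the prefix count
def pstep (k : List Int) (w m : Int) (i : Nat) : Int :=
  if (((k.take (i + 1)).count (k.getD i 0) : Int) == w) then min m ((i : Int) + 1) else m

theorem body_eval (k : List Int) (w : Int) (hle : ∀ v ∈ k, (k.count v : Int) ≤ w)
    (a : Nat) (ha : a < k.length) (m : Int) :
    solutionBody k w ((0 : Int), PySem.Dict.counter (k.take a), m) (a : Int)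
      = ((0 : Int), PySem.Dict.counter (k.take (a + 1)), pstep k w m a) := by
  have hkr : PySem.List.pyGetD k (a : Int) 0 = k.getD a 0 := PySem.List.pyGetD_natCast k a 0
  have hmem : k.getD a 0 ∈ k := by
    rw [List.getD_eq_getElem k 0 ha]; exact List.getElem_mem ha
  have hcnt : (((k.take (a + 1)).count (k.getD a 0) : Int)) ≤ w := by
    have h1 : (k.take (a + 1)).count (k.getD a 0) ≤ k.count (k.getD a 0) :=
      List.Sublist.count_le _ (List.take_sublist _ _)
    exact le_trans (by exact_mod_cast h1) (hle _ hmem)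
  simp only [solutionBody, hkr]
  rw [counter_take_step k a ha]
  rw [while_noop _ _ _ _ _ (by
    simp only [hkr, PySem.Dict.getD_counter]
    exact not_lt.2 hcnt)]
  simp only [PySem.Dict.getD_counter, pstep]
  norm_num

theorem A_loop (k : List Int) (w : Int) (hle : ∀ v ∈ k, (k.count v : Int) ≤ w) :
    ∀ (d a : Nat) (m : Int), a + d = k.length →
    (PySem.List.pyRange (a : Int) (k.length : Int)).foldl (solutionBody k w)
        ((0 : Int), PySem.Dict.counter (k.take a), m)
      = ((0 : Int), PySem.Dict.counter k, (List.range' a d).foldl (pstep k w) m) := by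
  intro d
  induction d with
  | zero =>
    intro a m ha
    have h1 : a = k.length := by omega
    subst h1
    rw [PySem.List.pyRange_one_eq_nil (le_refl _), List.take_length]
    rfl
  | succ d ih =>
    intro a m ha
    have halt : a < k.length := by omega
    have hcast : (a : Int) < (k.length : Int) := by exact_mod_cast halt
    rw [PySem.List.pyRange_one_cons hcast, List.foldl_cons, body_eval k w hle a halt m]
    have hsucc : ((a : Int) + 1) = ((a + 1 : Nat) : Int) := by push_cast; ring
    rw [hsucc, ih (a + 1) (pstep k w m a) (by omega), List.range'_succ]
    rfl

-- ---------- weight facts ----------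
theorem values_counter_eq (k : List Int) :
    (PySem.Dict.counter k).values = (PySem.Set.ofList k).map (fun v => (k.count v : Int)) := by
  rw [PySem.Dict.values_eq_map_keys _ (PySem.Dict.nodup_keys_counter k) 0,
      PySem.Dict.keys_counter]
  exact List.map_congr_left (fun v _ => PySem.Dict.getD_counter k v)

theorem weight_le {k : List Int} {w : Int}
    (hm : PySem.List.max? (PySem.Dict.counter k).values id = some w) :
    ∀ v ∈ k, (k.count v : Int) ≤ w := by
  intro v hv
  have hmem : ((k.count v : Int)) ∈ (PySem.Dict.counter k).values := by
    rw [values_counter_eq]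
    exact List.mem_map.2 ⟨v, (PySem.Set.mem_ofList k v).2 hv, rfl⟩
  simpa using PySem.List.max?_isMax hm _ hmem

theorem weight_ex {k : List Int} {w : Int}
    (hm : PySem.List.max? (PySem.Dict.counter k).values id = some w) :
    ∃ v ∈ k, (k.count v : Int) = w := by
  have := PySem.List.max?_mem hm
  rw [values_counter_eq] at this
  rcases List.mem_map.1 this with ⟨v, hv, hvw⟩
  exact ⟨v, (PySem.Set.mem_ofList k v).1 hv, hvw⟩

theorem max?_ne_none {k : List Int} (hk : k ≠ []) :
    PySem.List.max? (PySem.Dict.counter k).values id ≠ none := by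
  intro h
  rw [PySem.List.max?_eq_none_iff, values_counter_eq, List.map_eq_nil_iff] at h
  rcases List.exists_mem_of_ne_nil k hk with ⟨x, hx⟩
  have : x ∈ PySem.Set.ofList k := (PySem.Set.mem_ofList k x).2 hx
  simp [h] at this

-- ---------- B side ----------
theorem pairFold_split : ∀ (l : List Int) (j : Int) (d1 d2 : PySem.Dict Int Int),
    (PySem.List.enumerate l j).foldl
      (fun (st : PySem.Dict Int Int × PySem.Dict Int Int) p =>
        (st.1.insert p.2 (st.1.getD p.2 0 + 1), st.2.insert p.2 p.1)) (d1, d2)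
    = (l.foldl (fun d x => d.insert x (d.getD x 0 + 1)) d1,
       (PySem.List.enumerate l j).foldl (fun d p => d.insert p.2 p.1) d2) := by
  intro l
  induction l with
  | nil => intro j d1 d2; simp [PySem.List.enumerate_nil]
  | cons x xs ih =>
    intro j d1 d2
    rw [PySem.List.enumerate_cons]
    simp only [List.foldl_cons]
    exact ih (j + 1) _ _

theorem lastFold_not_mem : ∀ (l : List Int) (j : Int) (d : PySem.Dict Int Int) (v : Int),
    v ∉ l →
    ((PySem.List.enumerate l j).foldl (fun d p => d.insert p.2 p.1) d).getD v 0 = d.getD v 0 := by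
  intro l
  induction l with
  | nil => intro j d v _; simp [PySem.List.enumerate_nil]
  | cons x xs ih =>
    intro j d v hv
    rw [PySem.List.enumerate_cons]
    simp only [List.foldl_cons]
    rw [ih (j + 1) _ v (fun h => hv (List.mem_cons_of_mem _ h))]
    rw [PySem.Dict.getD_insert]
    have : v ≠ x := fun h => hv (h ▸ List.mem_cons_self ..)
    simp [this]

theorem lastFold_getD : ∀ (l : List Int) (j : Int) (d : PySem.Dict Int Int) (v : Int),
    v ∈ l →
    ((PySem.List.enumerate l j).foldl (fun d p => d.insert p.2 p.1) d).getD v 0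
      = j + (lIdx l v : Int) := by
  intro l
  induction l with
  | nil => intro _ _ _ h; cases h
  | cons x xs ih =>
    intro j d v hv
    rw [PySem.List.enumerate_cons]
    simp only [List.foldl_cons]
    by_cases hm : v ∈ xs
    · rw [ih (j + 1) _ v hm]
      simp only [lIdx, hm, if_true]
      push_cast; ring
    · have hx : v = x := by rcases List.mem_cons.1 hv with h | h <;> simp_all
      subst hx
      rw [lastFold_not_mem xs (j + 1) _ v hm]
      rw [PySem.Dict.getD_insert]
      simp [lIdx, hm]

-- glue: a min-fold over C1 equals Python min over C2 when the two candidate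
-- lists have the same members, all bounded by n
theorem min_glue (C1 C2 : List Int) (n : Int)
    (hiff : ∀ x, x ∈ C1 ↔ x ∈ C2)
    (hbound : ∀ x ∈ C1, x ≤ n)
    (hne : C2 ≠ []) :
    C1.foldl min (n + 1) = (PySem.List.min? C2 id).getD 0 := by
  rcases hm2 : PySem.List.min? C2 id with _ | m2
  · exact absurd ((PySem.List.min?_eq_none_iff C2 id).1 hm2) hne
  · simp only [Option.getD_some]
    have hm2C1 : m2 ∈ C1 := (hiff m2).2 (PySem.List.min?_mem hm2)
    have hAle : C1.foldl min (n + 1) ≤ m2 := foldl_min_le_mem hm2C1 _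
    have hAmem : C1.foldl min (n + 1) ∈ C1 := by
      rcases foldl_min_mem_or C1 (n + 1) with h | h
      · exfalso
        have := hbound m2 hm2C1
        omega
      · exact h
    have hle2 := PySem.List.min?_isMin hm2 _ ((hiff _).1 hAmem)
    simp only [id] at hle2
    omega

-- ===== VERDICT (by name: the statement is the Claim_ definition above) =====
theorem solution_spec : Claim_equal_solution := by
  intro k _ hk
  unfold Spec_solution solution solution_alt
  rw [pairFold_split k 0 PySem.Dict.empty PySem.Dict.empty]
  rw [PySem.Dict.foldl_insert_getD_add_one_eq_counter k]
  rcases hmax : PySem.List.max? (PySem.Dict.counter k).values id with _ | w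
  · exact absurd hmax (max?_ne_none hk)
  · simp only [hmax]
    have hle := weight_le hmax
    have hA := A_loop k w hle k.length 0 ((k.length : Int) + 1) (by omega)
    rw [List.take_zero] at hA
    have h0 : ((0 : Nat) : Int) = (0 : Int) := rfl
    rw [h0] at hA
    have hcntr0 : (PySem.Dict.empty : PySem.Dict Int Int) = PySem.Dict.counter ([] : List Int) := rfl
    rw [← hcntr0] at hA
    rw [hA]
    show (List.range' 0 k.length).foldl
        (fun m i => if (((k.take (i + 1)).count (k.getD i 0) : Int) == w)
          then min m ((i : Int) + 1) else m) ((k.length : Int) + 1) = _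
    -- A's result as a min-fold over the candidate list C1
    rw [foldl_if_min (fun i => (((k.take (i + 1)).count (k.getD i 0) : Int) == w))
        (fun i => ((i : Int) + 1)) (List.range' 0 k.length) ((k.length : Int) + 1)]
    rcases weight_ex hmax with ⟨v0, hv0, hv0w⟩
    apply min_glue
    · -- same membership
      intro x
      simp only [List.mem_map, List.mem_filter, List.mem_range'_1, PySem.Dict.keys_counter,
        PySem.Set.mem_ofList, PySem.Dict.getD_counter, beq_iff_eq]
      constructor
      · rintro ⟨i, ⟨hir, hcond⟩, rfl⟩
        have hin : i < k.length := by omega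
        have hvk : k.getD i 0 ∈ k := by
          rw [List.getD_eq_getElem k 0 hin]; exact List.getElem_mem hin
        have hcle : (k.take (i + 1)).count (k.getD i 0) ≤ k.count (k.getD i 0) :=
          List.Sublist.count_le _ (List.take_sublist _ _)
        have hwle : (k.count (k.getD i 0) : Int) ≤ w := weight_le hmax _ hvk
        have hceq : (k.take (i + 1)).count (k.getD i 0) = k.count (k.getD i 0) := by
          have h1 : ((k.take (i + 1)).count (k.getD i 0) : Int)
              ≤ (k.count (k.getD i 0) : Int) := by exact_mod_cast hcle
          omega
        have hnot : k.getD i 0 ∉ k.drop (i + 1) := count_take_eq_iff.1 hceq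
        have hlidx : i = lIdx k (k.getD i 0) := lIdx_unique hin rfl hnot
        refine ⟨k.getD i 0, ⟨hvk, by omega⟩, ?_⟩
        rw [lastFold_getD k 0 PySem.Dict.empty _ hvk, ← hlidx]
        ring
      · rintro ⟨v, ⟨hvk, hcw⟩, rfl⟩
        have hin : lIdx k v < k.length := lIdx_lt hvk
        have hget : k.getD (lIdx k v) 0 = v := lIdx_getD hvk
        have hceq : (k.take (lIdx k v + 1)).count v = k.count v :=
          count_take_eq_iff.2 (lIdx_last hvk)
        refine ⟨lIdx k v, ⟨by omega, ?_⟩, ?_⟩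
        · rw [hget]
          omega
        · rw [lastFold_getD k 0 PySem.Dict.empty v hvk]
          ring
    · -- every A candidate is at most len(k)
      intro x hx
      simp only [List.mem_map, List.mem_filter, List.mem_range'_1] at hx
      obtain ⟨i, ⟨hir, _⟩, rfl⟩ := hx
      have : (i : Int) < (k.length : Int) := by exact_mod_cast (by omega : i < k.length)
      omega
    · -- B's candidate list is nonempty
      apply List.ne_nil_of_mem (a := ((PySem.List.enumerate k).foldl
          (fun d p => d.insert p.2 p.1) PySem.Dict.empty).getD v0 0 + 1)
      exact List.mem_map.2 ⟨v0, List.mem_filter.2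
        ⟨by rw [PySem.Dict.keys_counter]; exact (PySem.Set.mem_ofList k v0).2 hv0,
         by rw [PySem.Dict.getD_counter]; simpa using hv0w⟩, rfl⟩
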